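-- pv_equiv track=rewrite | github.com/hyakuhei/atree | atree.py | parseTabbed
-- ===== SOURCE A (Python) =====
-- def visit(node:dict, new_lines: list, label: str=""):
--     l = f"{label}{node['id']}."
--     new_lines.append(f"{l} {node['string']}")
--
--     if len(node['children']) > 0:
--         for c in node['children']:
--             visit(c, new_lines, label=l)
--
-- def parseTabbed(lines: list[str]):
--     prev_node = None
--     root_node = None
--
--     for s in lines:
--         if len(s.strip()) == 0:
--             continue
--
--         depth = len(s.split("    "))
--
--         new_node = {
--                     "string": s.strip(),
--                     "depth": depth,
--                     "children": [],
--                     "parent": None,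
--                     "id":-1
--                 }
--
--         if prev_node == None:
--             new_node['id'] = 1
--             prev_node = new_node
--             root_node = new_node
--         else:
--             if depth == prev_node["depth"]:
--                 # Add a child to the parent of the prev_node
--                 # Making prev_node a sibiling of this new node
--                 new_node["parent"] = prev_node["parent"]
--                 new_node["parent"]["children"].append(new_node)
--                 new_node['id'] = len(new_node["parent"]["children"])
--
--                 #setup for next loop
--                 prev_node = new_node
--
--             elif depth > prev_node["depth"]:
--                 # Add a child to prev node
--                 new_node["parent"] = prev_node
--                 prev_node["children"].append(new_node)
--                 new_node['id'] = len(new_node["parent"]["children"])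
--
--                 #setup for next loop
--                 prev_node = new_node
--
--             elif depth < prev_node["depth"]:
--                 #Walk back up the tree
--                 ptr = prev_node
--                 while depth < ptr["depth"]:
--                     ptr = ptr["parent"]
--
--                 new_node["parent"] = ptr["parent"]
--                 ptr["parent"]["children"].append(new_node)
--                 new_node['id'] = len(new_node["parent"]["children"])
--
--                 #setup for next loop
--                 prev_node = new_node
--
--     new_lines = []
--     visit(root_node, new_lines)
--     return new_lines
-- ===== SOURCE B (Python) =====
-- def parseTabbed(lines: list[str]):
--     # One forward pass with a stack of (depth, label, child_count) frames:
--     # no tree, no parent pointers, no recursive visit.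
--     out = []
--     stack = []  # frames [depth, full_label, child_count]; root at index 0
--     for s in lines:
--         t = s.strip()
--         if not t:
--             continue
--         depth = len(s.split("    "))
--         if not stack:
--             label = "1."
--             stack.append([depth, label, 0])
--         else:
--             if depth <= stack[-1][0]:
--                 while depth < stack[-1][0]:
--                     stack.pop()
--                 stack.pop()
--             parent = stack[-1]
--             parent[2] += 1
--             label = f"{parent[1]}{parent[2]}."
--             stack.append([depth, label, 0])
--         out.append(f"{label} {t}")
--     return out
-- ===== Notes on version B (the rewrite author's own statement) =====
-- stated objective: simpler
-- what changed: Replaced the mutable dict tree with parent pointers plus a recursive preorder visit by a single forward pass over the lines that keeps a stack of (depth, label, child_count) ancestor frames and emits each numbered line directly.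
-- outside the precondition, e.g. on parseTabbed([]): A raises TypeError, B returns []
-- crash fix: On input whose lines are all blank (including the empty list) A raises TypeError (visit(None)); B returns []. — e.g. on parseTabbed(["", " "]): A raises TypeError, B returns []
import Mathlib
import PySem

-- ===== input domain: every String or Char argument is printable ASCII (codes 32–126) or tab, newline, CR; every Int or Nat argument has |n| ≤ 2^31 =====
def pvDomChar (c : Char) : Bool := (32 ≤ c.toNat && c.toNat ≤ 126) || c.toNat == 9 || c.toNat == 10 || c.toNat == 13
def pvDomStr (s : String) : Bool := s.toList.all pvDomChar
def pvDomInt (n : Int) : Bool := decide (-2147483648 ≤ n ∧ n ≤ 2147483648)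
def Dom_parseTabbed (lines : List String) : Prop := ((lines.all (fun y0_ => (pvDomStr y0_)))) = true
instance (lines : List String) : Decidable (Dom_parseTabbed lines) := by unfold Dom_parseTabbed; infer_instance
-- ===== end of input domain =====

-- B replaces A's mutable dict tree (parent pointers + recursive preorder visit) by one
-- forward pass with a stack of (depth, label, child_count) frames, emitting lines directly.
-- Equivalence is about the return value; neither version mutates its argument.

-- ===== PORT A =====
-- A's dicts form an object graph; the port models it as an arena (list of nodes),
-- with parent/children as indices into the arena.  Appending a dict = appending a node.
structure NodeA where
  str : String
  depth : Int
  children : List Nat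
  parent : Option Nat
  id : Int
deriving Repr, DecidableEq, Inhabited

-- visit(node, new_lines, label): the accumulator list is returned instead of mutated.
-- The 'if h : …' guard only makes the recursion well-founded; on the arenas A builds,
-- children indices are always in range (proved below).
def visitA (a : List NodeA) (i : Nat) (label : String) : List String :=
  let node := a.getD i default
  let l := label ++ PySem.Int.toStr node.id ++ "."
  (l ++ " " ++ node.str) ::
    (node.children.map (fun c => if h : i < c ∧ c < a.length then visitA a c l else [])).flatten
termination_by a.length - i
decreasing_by omega

-- the 'while depth < ptr["depth"]: ptr = ptr["parent"]' loop; fuel = arena size is enough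
-- because parent indices strictly decrease.  none = Python's TypeError (walked off the root).
def walkA (a : List NodeA) : Nat → Nat → Int → Option Nat
  | 0, _, _ => none
  | fuel+1, i, d =>
    let nd := a.getD i default
    if d < nd.depth then
      match nd.parent with
      | none => none
      | some p => walkA a fuel p d
    else some i

-- new_node["parent"] = p; p["children"].append(new_node); new_node["id"] = len(children)
def attachAt (a : List NodeA) (p : Nat) (t : String) (d : Int) (root : Option Nat) :
    List NodeA × Option Nat × Option Nat :=
  let pn := a.getD p default
  let cs := pn.children ++ [a.length]
  ((a.set p { pn with children := cs }) ++ [⟨t, d, [], some p, (cs.length : Int)⟩],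
   some a.length, root)

-- one iteration of A's for-loop over lines; state = (arena, prev_node, root_node).
-- Branches where Python raises TypeError return the state unchanged (excluded by Pre_).
def stepA (st : List NodeA × Option Nat × Option Nat) (s : String) :
    List NodeA × Option Nat × Option Nat :=
  let (a, prev, root) := st
  if PySem.Str.len (PySem.Str.strip s) = 0 then st
  else
    let t := PySem.Str.strip s
    let d : Int := (((PySem.Str.split? s "    ").getD []).length : Int)
    match prev with
    | none => (a ++ [⟨t, d, [], none, 1⟩], some a.length, some a.length)
    | some pi =>
      let pn := a.getD pi default
      if d = pn.depth then
        match pn.parent with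
        | none => st
        | some gp => attachAt a gp t d root
      else if pn.depth < d then
        attachAt a pi t d root
      else
        match walkA a a.length pi d with
        | none => st
        | some ptr =>
          match (a.getD ptr default).parent with
          | none => st
          | some gp => attachAt a gp t d root

def parseTabbed (lines : List String) : List String :=
  match lines.foldl stepA ([], none, none) with
  | (a, _, root) =>
    match root with
    | none => []   -- Python: visit(None) raises TypeError; excluded by Pre_
    | some r => visitA a r ""

-- ===== PORT B =====
-- one iteration of B's loop; state = (stack of frames (depth, label, child_count), out).
def stepB (st : List (Int × String × Int) × List String) (s : String) :
    List (Int × String × Int) × List String :=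
  let (stack, out) := st
  if PySem.Str.len (PySem.Str.strip s) = 0 then st
  else
    let t := PySem.Str.strip s
    let d : Int := (((PySem.Str.split? s "    ").getD []).length : Int)
    match stack with
    | [] => ([(d, "1.", 0)], out ++ ["1." ++ " " ++ t])
    | (td, _, _) :: _ =>
      -- 'if depth <= top: while depth < top: pop; pop' = dropWhile, then drop the stop frame
      let stack1 := if d ≤ td then (stack.dropWhile (fun f => decide (d < f.1))).tail else stack
      match stack1 with
      | [] => st   -- Python: IndexError; unreachable under Pre_
      | (pd, pl, pc) :: rest =>
        let lab := pl ++ PySem.Int.toStr (pc + 1) ++ "."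
        ((d, lab, 0) :: (pd, pl, pc + 1) :: rest, out ++ [lab ++ " " ++ t])

def parseTabbed_alt (lines : List String) : List String :=
  (lines.foldl stepB ([], [])).2

-- ===== PRECONDITION & SPEC =====
-- Pre_ excludes exactly the inputs where A raises TypeError: input with no non-blank line
-- (visit(None)), and depth sequences that walk off the root (sibling of the root, or a
-- dedent below/at the level of an ancestor that is the root).  preStep tracks only the
-- ancestor-depth stack, the minimal data deciding those crashes.
def preStep : Option (List Int) → Int → Option (List Int)
  | none, _ => none
  | some [], d => some [d]
  | some (t :: rest), d =>
    if t < d then some (d :: t :: rest)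
    else
      match (t :: rest).dropWhile (fun e => decide (d < e)) with
      | [] => none
      | [_] => none
      | _ :: r => some (d :: r)

def nonBlankDepths (lines : List String) : List Int :=
  (lines.filter (fun s => PySem.Str.len (PySem.Str.strip s) ≠ 0)).map
    (fun s => (((PySem.Str.split? s "    ").getD []).length : Int))

def Pre_parseTabbed (lines : List String) : Prop :=
  nonBlankDepths lines ≠ [] ∧ (nonBlankDepths lines).foldl preStep (some []) ≠ none
instance (lines : List String) : Decidable (Pre_parseTabbed lines) := by
  unfold Pre_parseTabbed; infer_instance

def pvWitness_parseTabbed : List String := ["root", "    a", "        b", "    c"]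

-- On input whose lines are all blank (including []) A raises TypeError (visit(None)); B returns [].
def Raises_parseTabbed (lines : List String) : Prop := nonBlankDepths lines = []
instance (lines : List String) : Decidable (Raises_parseTabbed lines) := by
  unfold Raises_parseTabbed; infer_instance
def pvRaiseWitness_parseTabbed : List String := ["", "   "]
def pvRaiseWitnessOut_parseTabbed : List String := []

def Spec_parseTabbed (lines : List String) (out : List String) : Prop := out = parseTabbed_alt lines
instance (lines : List String) (out : List String) : Decidable (Spec_parseTabbed lines out) := by unfold Spec_parseTabbed; infer_instance

-- ===== CLAIM (what is proved, stated in full; the proofs are below) =====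
def Claim_equal_parseTabbed : Prop := ∀ (lines : List String), Dom_parseTabbed lines → Pre_parseTabbed lines → Spec_parseTabbed lines (parseTabbed lines)
def Claim_raises_parseTabbed : Prop := (∀ (lines : List String), Dom_parseTabbed lines → Raises_parseTabbed lines → ¬ Pre_parseTabbed lines) ∧ (Dom_parseTabbed (pvRaiseWitness_parseTabbed) ∧ Raises_parseTabbed (pvRaiseWitness_parseTabbed) ∧ parseTabbed_alt (pvRaiseWitness_parseTabbed) = pvRaiseWitnessOut_parseTabbed)

-- ===== LEMMAS AND PROOFS =====

-- ---------- arena plumbing ----------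

def arenaAfter (a : List NodeA) (p : Nat) (t : String) (d : Int) : List NodeA :=
  (a.set p { a.getD p default with children := (a.getD p default).children ++ [a.length] }) ++
  [⟨t, d, [], some p, ((((a.getD p default).children ++ [a.length]).length : Nat) : Int)⟩]

theorem attachAt_eq (a : List NodeA) (p : Nat) (t : String) (d : Int) (root : Option Nat) :
    attachAt a p t d root = (arenaAfter a p t d, some a.length, root) := rfl

theorem arenaAfter_length (a : List NodeA) (p : Nat) (t : String) (d : Int) :
    (arenaAfter a p t d).length = a.length + 1 := by
  simp [arenaAfter]

theorem getD_arenaAfter_lt (a : List NodeA) (p k : Nat) (t : String) (d : Int)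
    (hk : k < a.length) (hkp : k ≠ p) :
    (arenaAfter a p t d).getD k default = a.getD k default := by
  simp [arenaAfter, List.getD_eq_getElem?_getD, List.getElem?_append, hk,
    List.getElem_set_ne, Ne.symm hkp]

theorem getD_arenaAfter_self (a : List NodeA) (p : Nat) (t : String) (d : Int)
    (hp : p < a.length) :
    (arenaAfter a p t d).getD p default
      = { a.getD p default with children := (a.getD p default).children ++ [a.length] } := by
  simp [arenaAfter, List.getD_eq_getElem?_getD, List.getElem?_append, hp,
    List.getElem?_set_self, hp]

theorem getD_arenaAfter_new (a : List NodeA) (p : Nat) (t : String) (d : Int) :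
    (arenaAfter a p t d).getD a.length default
      = ⟨t, d, [], some p, ((((a.getD p default).children ++ [a.length]).length : Nat) : Int)⟩ := by
  simp [arenaAfter, List.getD_eq_getElem?_getD, List.getElem?_append]

-- ---------- well-formed forests: each subtree lives in a half-open index interval ----------

def nxt (hi : Nat) : List Nat → Nat
  | [] => hi
  | c :: _ => c

-- TWF a p hi cs: cs are children indices (all > p), strictly increasing, each child c
-- together with its whole subtree occupying [c, next sibling or hi).
inductive TWF (a : List NodeA) : Nat → Nat → List Nat → Prop
  | nil (p hi : Nat) : TWF a p hi []
  | cons (p hi c : Nat) (cs : List Nat) :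
      p < c → c < nxt hi cs → nxt hi cs ≤ hi →
      TWF a c (nxt hi cs) ((a.getD c default).children) →
      TWF a p hi cs → TWF a p hi (c :: cs)

-- PathD a i li j lj: j is reachable from i by repeatedly taking the LAST child;
-- li / lj are the full labels visitA computes for i / j.
inductive PathD (a : List NodeA) : Nat → String → Nat → String → Prop
  | refl (i : Nat) (l : String) : PathD a i l i l
  | cons (i : Nat) (li : String) (c j : Nat) (lj : String) :
      (a.getD i default).children.getLast? = some c → i < c →
      PathD a c (li ++ PySem.Int.toStr ((a.getD c default).id) ++ ".") j lj →
      PathD a i li j lj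

-- CRup a r i fs: fs are B's frames for the ancestor chain of node i (head = i, bottom = root r);
-- each frame stores exactly (depth, full label, number of children) of its node.
inductive CRup (a : List NodeA) : Nat → Nat → List (Int × String × Int) → Prop
  | root (r : Nat) (f : Int × String × Int) :
      (a.getD r default).parent = none → (a.getD r default).id = 1 →
      f = ((a.getD r default).depth, "1.", ((a.getD r default).children.length : Int)) →
      CRup a r r [f]
  | step (r i p : Nat) (fi fp : Int × String × Int) (fs : List (Int × String × Int)) :
      (a.getD i default).parent = some p → p < i →
      (a.getD p default).children.getLast? = some i →
      fi = ((a.getD i default).depth,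
            fp.2.1 ++ PySem.Int.toStr ((a.getD i default).id) ++ ".",
            ((a.getD i default).children.length : Int)) →
      CRup a r p (fp :: fs) →
      CRup a r i (fi :: fp :: fs)

-- ---------- TWF lemmas ----------

theorem twf_head_lt {a : List NodeA} {p hi c : Nat} {cs : List Nat}
    (h : TWF a p hi (c :: cs)) : c < hi := by
  cases h with
  | cons _ _ _ _ h1 h2 h3 _ _ => omega

theorem twf_congr {a : List NodeA} {p hi : Nat} {cs : List Nat}
    (h : TWF a p hi cs) :
    ∀ (b : List NodeA), (∀ k, p < k → k < hi → b.getD k default = a.getD k default) →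
    TWF b p hi cs := by
  induction h with
  | nil => intro b _; exact TWF.nil _ _
  | cons p hi c cs h1 h2 h3 h4 h5 ih4 ih5 =>
    intro b hag
    refine TWF.cons p hi c cs h1 h2 h3 ?_ (ih5 b hag)
    have hc : b.getD c default = a.getD c default := hag c h1 (lt_of_lt_of_le h2 h3)
    rw [hc]
    exact ih4 b (fun k hk1 hk2 => hag k (lt_trans h1 hk1) (lt_of_lt_of_le hk2 h3))

theorem twf_getLast {a : List NodeA} {p hi : Nat} {cs : List Nat}
    (h : TWF a p hi cs) :
    ∀ c, cs.getLast? = some c →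
      p < c ∧ c < hi ∧ TWF a c hi ((a.getD c default).children) := by
  induction h with
  | nil => intro c hl; simp at hl
  | cons p hi c0 cs h1 h2 h3 h4 h5 ih4 ih5 =>
    intro c hl
    cases cs with
    | nil =>
      simp at hl
      subst hl
      exact ⟨h1, by simpa [nxt] using h2, by simpa [nxt] using h4⟩
    | cons c1 cs' =>
      rw [List.getLast?_cons_cons] at hl
      exact ih5 c hl

theorem twf_dropLast {a : List NodeA} {p hi : Nat} {cs : List Nat}
    (h : TWF a p hi cs) :
    ∀ c, cs.getLast? = some c → TWF a p c cs.dropLast := by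
  induction h with
  | nil => intro c hl; simp at hl
  | cons p hi c0 cs h1 h2 h3 h4 h5 ih4 ih5 =>
    intro c hl
    cases cs with
    | nil =>
      simp at hl
      subst hl
      exact TWF.nil _ _
    | cons c1 cs' =>
      rw [List.getLast?_cons_cons] at hl
      have ih := ih5 c hl
      have hle : nxt hi (c1 :: cs') ≤ c := by
        cases cs' with
        | nil =>
          simp at hl
          simp [nxt, hl]
        | cons c2 cs'' =>
          have h' : TWF a p c (c1 :: (c2 :: cs'').dropLast) := by
            simpa using ih
          have := twf_head_lt h'
          simp [nxt]
          omega
      show TWF a p c ((c0 :: c1 :: cs').dropLast)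
      rw [List.dropLast_cons₂]
      have hnv : nxt c ((c1 :: cs').dropLast) = nxt hi (c1 :: cs') := by
        cases cs' with
        | nil => simp at hl; simp [nxt, hl]
        | cons c2 cs'' => simp [nxt]
      refine TWF.cons p c c0 _ h1 ?_ ?_ ?_ ih
      · rw [hnv]; exact h2
      · rw [hnv]; exact hle
      · rw [hnv]; exact h4

theorem twf_snoc {a : List NodeA} {p m : Nat} {cs : List Nat}
    (h : TWF a p m cs) :
    ∀ hi', p < m → m < hi' → TWF a m hi' ((a.getD m default).children) →
    TWF a p hi' (cs ++ [m]) := by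
  induction h with
  | nil p0 hi0 =>
    intro hi' hpm hm hch
    exact TWF.cons p0 hi' hi0 [] hpm (by simpa [nxt] using hm) (by simp [nxt])
      (by simpa [nxt] using hch) (TWF.nil _ _)
  | cons p0 hi0 c cs h1 h2 h3 h4 h5 ih4 ih5 =>
    intro hi' hpm hm hch
    have hnxt : nxt hi' (cs ++ [hi0]) = nxt hi0 cs := by
      cases cs <;> simp [nxt]
    refine TWF.cons p0 hi' c (cs ++ [hi0]) h1 ?_ ?_ ?_ (ih5 hi' hpm hm hch)
    · rw [hnxt]; exact h2
    · rw [hnxt]; omega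
    · rw [hnxt]; exact h4

-- ---------- visitA under arena changes outside the subtree interval ----------

theorem visit_eq (a : List NodeA) (i : Nat) (label : String) :
    visitA a i label =
      ((label ++ PySem.Int.toStr (a.getD i default).id ++ ".") ++ " " ++ (a.getD i default).str) ::
        ((a.getD i default).children.map (fun c =>
          if h : i < c ∧ c < a.length then
            visitA a c (label ++ PySem.Int.toStr (a.getD i default).id ++ ".") else [])).flatten := by
  rw [visitA]

theorem visit_agree_chain {a : List NodeA} {p hi : Nat} {cs : List Nat}
    (h : TWF a p hi cs) :
    ∀ (b : List NodeA), hi ≤ a.length → a.length ≤ b.length →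
    (∀ k, p < k → k < hi → b.getD k default = a.getD k default) →
    ∀ lab, cs.map (fun c => if h : p < c ∧ c < b.length then visitA b c lab else [])
      = cs.map (fun c => if h : p < c ∧ c < a.length then visitA a c lab else []) := by
  induction h with
  | nil => intro b _ _ _ lab; simp
  | cons p hi c cs h1 h2 h3 h4 h5 ih4 ih5 =>
    intro b hhi hab hag lab
    have hc_hi : c < hi := lt_of_lt_of_le h2 h3
    have hca : c < a.length := lt_of_lt_of_le hc_hi hhi
    have hcb : c < b.length := lt_of_lt_of_le hca hab
    have hhead : visitA b c lab = visitA a c lab := by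
      rw [visit_eq, visit_eq]
      have hnode : b.getD c default = a.getD c default := hag c h1 hc_hi
      rw [hnode]
      have := ih4 b (le_trans h3 hhi) hab
        (fun k hk1 hk2 => hag k (lt_trans h1 hk1) (lt_of_lt_of_le hk2 h3))
        (lab ++ PySem.Int.toStr (a.getD c default).id ++ ".")
      exact congrArg _ (congrArg _ this)
    simp only [List.map_cons]
    rw [dif_pos ⟨h1, hcb⟩, dif_pos ⟨h1, hca⟩, hhead, ih5 b hhi hab hag lab]

-- ---------- PathD lemmas ----------

theorem pathD_le {a : List NodeA} {i : Nat} {li : String} {j : Nat} {lj : String}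
    (h : PathD a i li j lj) : i ≤ j := by
  induction h with
  | refl => exact le_rfl
  | cons i li c j lj h1 h2 h3 ih => omega

theorem pathD_snoc {a : List NodeA} {r : Nat} {l : String} {i : Nat} {li : String}
    (h : PathD a r l i li) {c : Nat}
    (hc : (a.getD i default).children.getLast? = some c) (hic : i < c) :
    PathD a r l c (li ++ PySem.Int.toStr ((a.getD c default).id) ++ ".") := by
  induction h with
  | refl i0 l0 => exact PathD.cons i0 l0 c c _ hc hic (PathD.refl _ _)
  | cons i0 li0 c0 j lj h1 h2 h3 ih => exact PathD.cons i0 li0 c0 c _ h1 h2 (ih hc hic)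

theorem dropLast_getLast?_eq {α : Type} {l : List α} {x : α}
    (h : l.getLast? = some x) : l.dropLast ++ [x] = l := by
  induction l with
  | nil => simp at h
  | cons y l ih =>
    cases l with
    | nil => simp at h; simp [h]
    | cons z l' =>
      rw [List.getLast?_cons_cons] at h
      simpa using ih h

-- the crux: appending a fresh node as the new last child of a node p on the rightmost
-- path appends exactly one line (with p's label and the new id) to the rendered output.
theorem visit_insert {a : List NodeA} {r p : Nat} {lr lp : String} {t : String} {d : Int}
    (hpath : PathD a r lr p lp) :
    TWF a r a.length ((a.getD r default).children) →
    r < a.length → p < a.length →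
    ∀ lab0, lr = lab0 ++ PySem.Int.toStr ((a.getD r default).id) ++ "." →
    visitA (arenaAfter a p t d) r lab0
      = visitA a r lab0 ++
        [(lp ++ PySem.Int.toStr ((((a.getD p default).children ++ [a.length]).length : Nat) : Int) ++ ".") ++ " " ++ t] := by
  induction hpath with
  | refl i l =>
    intro htwf hr hp lab0 hlr
    have hlen := arenaAfter_length a i t d
    have hself := getD_arenaAfter_self a i t d hp
    have hchain := visit_agree_chain htwf (arenaAfter a i t d) le_rfl (by omega)
      (fun k hk1 hk2 => getD_arenaAfter_lt a i k t d hk2 (by omega))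
      (lab0 ++ PySem.Int.toStr ((a.getD i default).id) ++ ".")
    have hnewvisit : visitA (arenaAfter a i t d) a.length
        (lab0 ++ PySem.Int.toStr ((a.getD i default).id) ++ ".")
        = [((lab0 ++ PySem.Int.toStr ((a.getD i default).id) ++ ".")
            ++ PySem.Int.toStr ((((a.getD i default).children ++ [a.length]).length : Nat) : Int) ++ ".") ++ " " ++ t] := by
      rw [visit_eq, getD_arenaAfter_new]
      simp
    rw [visit_eq, visit_eq, hself]
    simp only [List.map_append, List.flatten_append, List.map_cons, List.map_nil]
    rw [dif_pos ⟨hp, by omega⟩]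
    rw [hchain, hnewvisit]
    simp [hlr]
  | cons i li c j lj h1 h2 h3 ih =>
    intro htwf hr hp lab0 hlr
    have hcj : c ≤ j := pathD_le h3
    have hlen := arenaAfter_length a j t d
    obtain ⟨hic, hca, htwfc⟩ := twf_getLast htwf c h1
    have hdrop := twf_dropLast htwf c h1
    have hnode : (arenaAfter a j t d).getD i default = a.getD i default :=
      getD_arenaAfter_lt a j i t d hr (by omega)
    have hchain := visit_agree_chain hdrop (arenaAfter a j t d) (by omega) (by omega)
      (fun k hk1 hk2 => getD_arenaAfter_lt a j k t d (by omega) (by omega))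
      (lab0 ++ PySem.Int.toStr ((a.getD i default).id) ++ ".")
    have hlast := ih htwfc hca hp li rfl
    rw [visit_eq, visit_eq, hnode]
    rw [← dropLast_getLast?_eq h1]
    simp only [List.map_append, List.flatten_append, List.map_cons, List.map_nil]
    rw [dif_pos ⟨hic, by omega⟩, dif_pos ⟨hic, hca⟩]
    rw [hchain, ← hlr, hlast]
    simp

-- inserting at a rightmost-path node-- inserting at a rightmost-path node preserves the interval well-formedness.
theorem twf_insert {a : List NodeA} {r p : Nat} {lr lp : String} {t : String} {d : Int}
    (hpath : PathD a r lr p lp) :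
    TWF a r a.length ((a.getD r default).children) →
    r < a.length → p < a.length →
    TWF (arenaAfter a p t d) r (a.length + 1)
      (((arenaAfter a p t d).getD r default).children) := by
  induction hpath with
  | refl i l =>
    intro htwf hr hp
    have hself := getD_arenaAfter_self a i t d hp
    rw [hself]
    have h1 : TWF (arenaAfter a i t d) i a.length ((a.getD i default).children) :=
      twf_congr htwf _ (fun k hk1 hk2 => getD_arenaAfter_lt a i k t d hk2 (by omega))
    have h2 : TWF (arenaAfter a i t d) a.length (a.length + 1)
        (((arenaAfter a i t d).getD a.length default).children) := by
      rw [getD_arenaAfter_new]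
      exact TWF.nil _ _
    exact twf_snoc h1 (a.length + 1) hp (by omega) h2
  | cons i li c j lj h1 h2 h3 ih =>
    intro htwf hr hp
    have hcj : c ≤ j := pathD_le h3
    obtain ⟨hic, hca, htwfc⟩ := twf_getLast htwf c h1
    have hdrop := twf_dropLast htwf c h1
    have hnode : (arenaAfter a j t d).getD i default = a.getD i default :=
      getD_arenaAfter_lt a j i t d hr (by omega)
    rw [hnode]
    have hbd : TWF (arenaAfter a j t d) i c ((a.getD i default).children.dropLast) :=
      twf_congr hdrop _ (fun k hk1 hk2 => getD_arenaAfter_lt a j k t d (by omega) (by omega))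
    have hc' : TWF (arenaAfter a j t d) c (a.length + 1)
        (((arenaAfter a j t d).getD c default).children) := ih htwfc hca hp
    rw [← dropLast_getLast?_eq h1]
    exact twf_snoc hbd (a.length + 1) hic (by omega) hc'

-- ---------- CRup lemmas ----------

theorem cr_ne_nil {a : List NodeA} {r i : Nat} {fs : List (Int × String × Int)}
    (h : CRup a r i fs) : fs ≠ [] := by
  cases h <;> simp

theorem cr_len {a : List NodeA} {fs : List (Int × String × Int)} :
    ∀ {r i : Nat}, CRup a r i fs → fs.length ≤ i + 1 := by
  induction fs with
  | nil => intro r i h; exact absurd rfl (cr_ne_nil h)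
  | cons f fs ih =>
    intro r i h
    cases h with
    | root _ h1 h2 h3 => simp
    | step _ p _ fp fs' h1 h2 h3 h4 h5 =>
      have := ih h5
      simp at this ⊢
      omega

theorem cr_head {a : List NodeA} {r i : Nat} {g : Int × String × Int}
    {fs : List (Int × String × Int)} (h : CRup a r i (g :: fs)) :
    g.1 = (a.getD i default).depth ∧ g.2.2 = ((a.getD i default).children.length : Int) := by
  cases h with
  | root _ h1 h2 h3 => rw [h3]; exact ⟨rfl, rfl⟩
  | step _ p _ fp fs' h1 h2 h3 h4 h5 => rw [h4]; exact ⟨rfl, rfl⟩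

theorem cr_congr {a : List NodeA} {fs : List (Int × String × Int)} :
    ∀ {r q : Nat}, CRup a r q fs →
    ∀ (b : List NodeA), (∀ k, k ≤ q → b.getD k default = a.getD k default) →
    CRup b r q fs := by
  induction fs with
  | nil => intro r q h; exact absurd rfl (cr_ne_nil h)
  | cons f fs ih =>
    intro r q h b hag
    cases h with
    | root _ h1 h2 h3 =>
      exact CRup.root _ f (by rw [hag _ le_rfl]; exact h1) (by rw [hag _ le_rfl]; exact h2)
        (by rw [hag _ le_rfl]; exact h3)
    | step _ p _ fp fs' h1 h2 h3 h4 h5 =>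
      refine CRup.step _ _ p f fp fs' (by rw [hag _ le_rfl]; exact h1) h2
        (by rw [hag p (by omega)]; exact h3) ?_
        (ih h5 b (fun k hk => hag k (by omega)))
      rw [hag _ le_rfl]
      exact h4

theorem walkA_succ (a : List NodeA) (fuel i : Nat) (d : Int) :
    walkA a (fuel+1) i d =
      if d < (a.getD i default).depth then
        (match (a.getD i default).parent with
         | none => none
         | some p => walkA a fuel p d)
      else some i := by
  rw [walkA]

theorem cr_walk {a : List NodeA} (d : Int) {fs : List (Int × String × Int)} :
    ∀ {r i : Nat}, CRup a r i fs →
    ∀ fuel, fs.length ≤ fuel →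
      (fs.dropWhile (fun g => decide (d < g.1)) = [] → walkA a fuel i d = none) ∧
      (∀ g rest, fs.dropWhile (fun g => decide (d < g.1)) = g :: rest →
        ∃ j, walkA a fuel i d = some j ∧ j ≤ i ∧ CRup a r j (g :: rest)) := by
  induction fs with
  | nil => intro r i h; exact absurd rfl (cr_ne_nil h)
  | cons f fs ih =>
    intro r i h fuel hfuel
    match fuel, hfuel with
    | fuel + 1, hfuel =>
      rw [walkA_succ]
      cases h with
      | root _ h1 h2 h3 =>
        by_cases hd : d < (a.getD r default).depth
        · rw [if_pos hd, h1]
          constructor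
          · intro _; rfl
          · intro g rest hdw
            rw [List.dropWhile_cons, if_pos (by rw [h3]; simpa using hd)] at hdw
            simp at hdw
        · rw [if_neg hd]
          constructor
          · intro hdw
            rw [List.dropWhile_cons, if_neg (by rw [h3]; simpa using hd)] at hdw
            simp at hdw
          · intro g rest hdw
            rw [List.dropWhile_cons, if_neg (by rw [h3]; simpa using hd)] at hdw
            cases hdw
            exact ⟨r, rfl, le_rfl, CRup.root r f h1 h2 h3⟩
      | step _ p _ fp fs' h1 h2 h3 h4 h5 =>
        by_cases hd : d < (a.getD i default).depth
        · rw [if_pos hd, h1]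
          have hfuel' : (fp :: fs').length ≤ fuel := by simp at hfuel ⊢; omega
          constructor
          · intro hdw
            rw [List.dropWhile_cons, if_pos (by rw [h4]; simpa using hd)] at hdw
            exact (ih h5 fuel hfuel').1 hdw
          · intro g rest hdw
            rw [List.dropWhile_cons, if_pos (by rw [h4]; simpa using hd)] at hdw
            obtain ⟨j, hj1, hj2, hj3⟩ := (ih h5 fuel hfuel').2 g rest hdw
            exact ⟨j, hj1, by omega, hj3⟩
        · rw [if_neg hd]
          constructor
          · intro hdw
            rw [List.dropWhile_cons, if_neg (by rw [h4]; simpa using hd)] at hdw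
            simp at hdw
          · intro g rest hdw
            rw [List.dropWhile_cons, if_neg (by rw [h4]; simpa using hd)] at hdw
            cases hdw
            exact ⟨i, rfl, le_rfl, CRup.step r i p f fp fs' h1 h2 h3 h4 h5⟩

theorem cr_to_path {a : List NodeA} {fs : List (Int × String × Int)} :
    ∀ {r i : Nat}, CRup a r i fs →
    ∀ g gs, fs = g :: gs → PathD a r "1." i g.2.1 := by
  induction fs with
  | nil => intro r i h; exact fun g gs hfs => absurd rfl (cr_ne_nil h)
  | cons f fs ih =>
    intro r i h g gs hfs
    cases hfs
    cases h with
    | root _ h1 h2 h3 =>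
      rw [h3]
      exact PathD.refl _ _
    | step _ p _ fp fs' h1 h2 h3 h4 h5 =>
      rw [h4]
      exact pathD_snoc (ih h5 fp fs' rfl) h3 h2

theorem cr_attach {a : List NodeA} {r p : Nat} {dp : Int} {lp : String} {cp : Int}
    {fs : List (Int × String × Int)}
    (h : CRup a r p ((dp, lp, cp) :: fs)) (hp : p < a.length) (t : String) (d : Int) :
    CRup (arenaAfter a p t d) r a.length
      ((d, lp ++ PySem.Int.toStr (cp + 1) ++ ".", 0) :: (dp, lp, cp + 1) :: fs) := by
  have hself := getD_arenaAfter_self a p t d hp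
  have hnew := getD_arenaAfter_new a p t d
  have hcp : cp = ((a.getD p default).children.length : Int) := (cr_head h).2
  have hmid : CRup (arenaAfter a p t d) r p ((dp, lp, cp + 1) :: fs) := by
    cases h with
    | root _ h1 h2 h3 =>
      refine CRup.root r (dp, lp, cp + 1) (by rw [hself]; exact h1) (by rw [hself]; exact h2) ?_
      rw [hself]
      have h3' : dp = (a.getD r default).depth ∧ lp = "1."
          ∧ cp = ((a.getD r default).children.length : Int) := by
        simpa [Prod.ext_iff] using h3
      simp only [h3'.1, h3'.2.1, h3'.2.2]
      simp
    | step _ p' _ fp fs' h1 h2 h3 h4 h5 =>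
      have hag : ∀ k, k ≤ p' → (arenaAfter a p t d).getD k default = a.getD k default := by
        intro k hk
        exact getD_arenaAfter_lt a p k t d (by omega) (by omega)
      refine CRup.step r p p' (dp, lp, cp + 1) fp fs' (by rw [hself]; exact h1) h2
        (by rw [hag p' le_rfl]; exact h3) ?_ (cr_congr h5 _ hag)
      rw [hself]
      have h4' : dp = (a.getD p default).depth
          ∧ lp = fp.2.1 ++ PySem.Int.toStr ((a.getD p default).id) ++ "."
          ∧ cp = ((a.getD p default).children.length : Int) := by
        simpa [Prod.ext_iff] using h4
      simp only [h4'.1, h4'.2.1, h4'.2.2]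
      simp
  refine CRup.step r a.length p (d, lp ++ PySem.Int.toStr (cp + 1) ++ ".", 0) (dp, lp, cp + 1) fs
    (by rw [hnew]) hp (by rw [hself]; simp) ?_ hmid
  rw [hnew]
  simp [hcp]

-- ---------- the step invariant ----------

structure InvP (a : List NodeA) (r : Nat) (stack : List (Int × String × Int))
    (out : List String) : Prop where
  hr : r < a.length
  hid : (a.getD r default).id = 1
  cr : CRup a r (a.length - 1) stack
  twf : TWF a r a.length ((a.getD r default).children)
  out_eq : out = visitA a r ""

theorem attach_common {a : List NodeA} {r : Nat} {stack : List (Int × String × Int)}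
    {out : List String} {p : Nat} {dp : Int} {lp : String} {cp : Int}
    {fs : List (Int × String × Int)}
    (hinv : InvP a r stack out)
    (hcr : CRup a r p ((dp, lp, cp) :: fs)) (hp : p < a.length) (t : String) (d : Int) :
    InvP (arenaAfter a p t d) r
      ((d, lp ++ PySem.Int.toStr (cp + 1) ++ ".", 0) :: (dp, lp, cp + 1) :: fs)
      (out ++ [(lp ++ PySem.Int.toStr (cp + 1) ++ ".") ++ " " ++ t]) := by
  have hlen := arenaAfter_length a p t d
  have hpath : PathD a r "1." p lp := cr_to_path hcr (dp, lp, cp) fs rfl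
  have hanchor : ("1." : String) = "" ++ PySem.Int.toStr ((a.getD r default).id) ++ "." := by
    rw [hinv.hid]
    decide
  have hcp : cp = ((a.getD p default).children.length : Int) := (cr_head hcr).2
  refine ⟨by have := hinv.hr; omega, ?_, ?_, ?_, ?_⟩
  · by_cases hrp : r = p
    · subst hrp
      rw [getD_arenaAfter_self a r t d hp]
      exact hinv.hid
    · rw [getD_arenaAfter_lt a p r t d hinv.hr hrp]
      exact hinv.hid
  · rw [show (arenaAfter a p t d).length - 1 = a.length by omega]
    exact cr_attach hcr hp t d
  · rw [show (arenaAfter a p t d).length = a.length + 1 from hlen]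
    exact twf_insert hpath hinv.twf hinv.hr hp
  · have := visit_insert hpath hinv.twf hinv.hr hp (t := t) (d := d) "" hanchor
    rw [this, ← hinv.out_eq]
    have : (((a.getD p default).children ++ [a.length]).length : Int) = cp + 1 := by
      simp [hcp]
    rw [this]

theorem stepA_eqbranch (a : List NodeA) (pi gp : Nat) (root : Option Nat) (s : String)
    (hnb : ¬ PySem.Str.len (PySem.Str.strip s) = 0)
    (hd : (((PySem.Str.split? s "    ").getD []).length : Int) = (a.getD pi default).depth)
    (hpar : (a.getD pi default).parent = some gp) :
    stepA (a, some pi, root) s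
      = attachAt a gp (PySem.Str.strip s) (((PySem.Str.split? s "    ").getD []).length : Int) root := by
  simp only [stepA]
  rw [if_neg hnb, if_pos hd, hpar]

theorem stepA_push (a : List NodeA) (pi : Nat) (root : Option Nat) (s : String)
    (hnb : ¬ PySem.Str.len (PySem.Str.strip s) = 0)
    (hd : (a.getD pi default).depth < (((PySem.Str.split? s "    ").getD []).length : Int)) :
    stepA (a, some pi, root) s
      = attachAt a pi (PySem.Str.strip s) (((PySem.Str.split? s "    ").getD []).length : Int) root := by
  simp only [stepA]
  rw [if_neg hnb, if_neg (by omega : ¬ (((PySem.Str.split? s "    ").getD []).length : Int) = (a.getD pi default).depth),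
    if_pos hd]

theorem stepA_walk (a : List NodeA) (pi gp j : Nat) (root : Option Nat) (s : String)
    (hnb : ¬ PySem.Str.len (PySem.Str.strip s) = 0)
    (hd : (((PySem.Str.split? s "    ").getD []).length : Int) < (a.getD pi default).depth)
    (hw : walkA a a.length pi (((PySem.Str.split? s "    ").getD []).length : Int) = some j)
    (hpar : (a.getD j default).parent = some gp) :
    stepA (a, some pi, root) s
      = attachAt a gp (PySem.Str.strip s) (((PySem.Str.split? s "    ").getD []).length : Int) root := by
  simp only [stepA]
  rw [if_neg hnb, if_neg (by omega : ¬ (((PySem.Str.split? s "    ").getD []).length : Int) = (a.getD pi default).depth),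
    if_neg (by omega : ¬ (a.getD pi default).depth < (((PySem.Str.split? s "    ").getD []).length : Int)),
    hw]
  simp only [hpar]

theorem stepB_push (td : Int) (l1 : String) (c1 : Int) (fs0 : List (Int × String × Int))
    (out : List String) (s : String)
    (hnb : ¬ PySem.Str.len (PySem.Str.strip s) = 0)
    (hd : ¬ (((PySem.Str.split? s "    ").getD []).length : Int) ≤ td) :
    stepB ((td, l1, c1) :: fs0, out) s
      = (((((PySem.Str.split? s "    ").getD []).length : Int),
            l1 ++ PySem.Int.toStr (c1 + 1) ++ ".", 0) :: (td, l1, c1 + 1) :: fs0,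
         out ++ [(l1 ++ PySem.Int.toStr (c1 + 1) ++ ".") ++ " " ++ PySem.Str.strip s]) := by
  simp only [stepB]
  rw [if_neg hnb, if_neg hd]

theorem stepB_pop (td : Int) (l1 : String) (c1 pd pc : Int) (pl : String)
    (fs0 rest : List (Int × String × Int)) (g : Int × String × Int)
    (out : List String) (s : String)
    (hnb : ¬ PySem.Str.len (PySem.Str.strip s) = 0)
    (hd : (((PySem.Str.split? s "    ").getD []).length : Int) ≤ td)
    (hdrop : ((td, l1, c1) :: fs0).dropWhile
        (fun f => decide ((((PySem.Str.split? s "    ").getD []).length : Int) < f.1))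
      = g :: (pd, pl, pc) :: rest) :
    stepB ((td, l1, c1) :: fs0, out) s
      = (((((PySem.Str.split? s "    ").getD []).length : Int),
            pl ++ PySem.Int.toStr (pc + 1) ++ ".", 0) :: (pd, pl, pc + 1) :: rest,
         out ++ [(pl ++ PySem.Int.toStr (pc + 1) ++ ".") ++ " " ++ PySem.Str.strip s]) := by
  simp only [stepB]
  rw [if_neg hnb, if_pos hd, hdrop]
  rfl

theorem preStep_lt {x d : Int} {xs : List Int} (h : x < d) :
    preStep (some (x :: xs)) d = some (d :: x :: xs) := by
  simp [preStep, h]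

theorem preStep_ge {x d : Int} {xs : List Int} (h : ¬ x < d) :
    preStep (some (x :: xs)) d
      = (match (x :: xs).dropWhile (fun e => decide (d < e)) with
         | [] => none
         | [_] => none
         | _ :: rst => some (d :: rst)) := by
  simp only [preStep]
  rw [if_neg h]

theorem dropWhile_fst {d : Int} (fs : List (Int × String × Int)) :
    ((fs.map (fun f => f.1)).dropWhile (fun e => decide (d < e)))
      = (fs.dropWhile (fun g => decide (d < g.1))).map (fun f => f.1) := by
  induction fs with
  | nil => rfl
  | cons f fs ih =>
    by_cases hd : d < f.1
    · simp [List.dropWhile_cons, hd, ih]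
    · simp [List.dropWhile_cons, hd]

theorem step_one {a : List NodeA} {r : Nat} {stack : List (Int × String × Int)}
    {out : List String} (hinv : InvP a r stack out) (s : String)
    (hnb : ¬ PySem.Str.len (PySem.Str.strip s) = 0)
    (hpre : preStep (some (stack.map (fun f => f.1)))
      ((((PySem.Str.split? s "    ").getD []).length : Int)) ≠ none) :
    ∃ a' stack' out',
      stepA (a, some (a.length - 1), some r) s = (a', some (a'.length - 1), some r) ∧
      stepB (stack, out) s = (stack', out') ∧ InvP a' r stack' out' ∧
      preStep (some (stack.map (fun f => f.1)))
        ((((PySem.Str.split? s "    ").getD []).length : Int)) = some (stack'.map (fun f => f.1)) := by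
  rcases stack with _ | ⟨⟨d1, l1, c1⟩, fs0⟩
  · exact absurd rfl (cr_ne_nil hinv.cr)
  have hcr := hinv.cr
  have hd1 : d1 = (a.getD (a.length - 1) default).depth := (cr_head hcr).1
  have halen : 1 ≤ a.length := by have := hinv.hr; omega
  rcases lt_trichotomy ((((PySem.Str.split? s "    ").getD []).length : Int))
    ((a.getD (a.length - 1) default).depth) with hlt | heq | hgt
  · -- dedent: A walks the parent chain, B pops frames
    have hwalkall := cr_walk ((((PySem.Str.split? s "    ").getD []).length : Int)) hcr a.length
      (by have := cr_len hcr; omega)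
    rcases hdw : (((d1, l1, c1) :: fs0).dropWhile
        (fun g => decide ((((PySem.Str.split? s "    ").getD []).length : Int) < g.1))) with _ | ⟨g, rest⟩
    · exfalso
      apply hpre
      rw [List.map_cons, preStep_ge (by omega),
        show ((d1, l1, c1).1 :: List.map (fun f => f.1) fs0)
            = (((d1, l1, c1) :: fs0).map (fun f => f.1)) from rfl,
        dropWhile_fst, hdw]
      rfl
    · rcases rest with _ | ⟨⟨pd, pl, pc⟩, fs'⟩
      · exfalso
        apply hpre
        rw [List.map_cons, preStep_ge (by omega),
          show ((d1, l1, c1).1 :: List.map (fun f => f.1) fs0)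
              = (((d1, l1, c1) :: fs0).map (fun f => f.1)) from rfl,
          dropWhile_fst, hdw]
        rfl
      · obtain ⟨j, hwj, hji, hcrj⟩ := hwalkall.2 g ((pd, pl, pc) :: fs') hdw
        cases hcrj with
        | step _ p _ fp fs'' h1 h2 h3 h4 h5 =>
          have hp : p < a.length := by omega
          have hAc := attach_common hinv h5 hp (PySem.Str.strip s)
            ((((PySem.Str.split? s "    ").getD []).length : Int))
          refine ⟨_, _, _, ?_, ?_, hAc, ?_⟩
          · rw [stepA_walk a (a.length - 1) p j (some r) s hnb hlt hwj h1, attachAt_eq]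
            rw [show (arenaAfter a p (PySem.Str.strip s) ((((PySem.Str.split? s "    ").getD []).length : Int))).length - 1 = a.length by simp [arenaAfter_length]]
          · exact stepB_pop d1 l1 c1 pd pc pl fs0 fs' g out s hnb (by omega) hdw
          · rw [List.map_cons, preStep_ge (by omega),
              show ((d1, l1, c1).1 :: List.map (fun f => f.1) fs0)
                  = (((d1, l1, c1) :: fs0).map (fun f => f.1)) from rfl,
              dropWhile_fst, hdw]
            simp
  · -- same depth: A attaches to prev's parent, B pops exactly the top frame
    have hne : ¬ (((PySem.Str.split? s "    ").getD []).length : Int) < d1 := by omega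
    cases hcr with
    | root _ h1 h2 h3 =>
      exfalso
      apply hpre
      rw [List.map_cons, List.map_nil, preStep_ge (by omega),
        List.dropWhile_cons, if_neg (by simpa using hne)]
    | step _ p _ fp fs' h1 h2 h3 h4 h5 =>
      obtain ⟨pd, pl, pc⟩ := fp
      have hp : p < a.length := by omega
      have hAc := attach_common hinv h5 hp (PySem.Str.strip s)
        ((((PySem.Str.split? s "    ").getD []).length : Int))
      have hdw : (((d1, l1, c1) :: (pd, pl, pc) :: fs').dropWhile
          (fun g => decide ((((PySem.Str.split? s "    ").getD []).length : Int) < g.1)))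
          = (d1, l1, c1) :: (pd, pl, pc) :: fs' := by
        rw [List.dropWhile_cons, if_neg (by simpa using hne)]
      refine ⟨_, _, _, ?_, ?_, hAc, ?_⟩
      · rw [stepA_eqbranch a (a.length - 1) p (some r) s hnb heq h1, attachAt_eq]
        rw [show (arenaAfter a p (PySem.Str.strip s) ((((PySem.Str.split? s "    ").getD []).length : Int))).length - 1 = a.length by simp [arenaAfter_length]]
      · exact stepB_pop d1 l1 c1 pd pc pl ((pd, pl, pc) :: fs') fs' (d1, l1, c1) out s hnb (by omega) hdw
      · rw [List.map_cons, preStep_ge (by omega),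
          show ((d1, l1, c1).1 :: List.map (fun f => f.1) ((pd, pl, pc) :: fs'))
              = (((d1, l1, c1) :: (pd, pl, pc) :: fs').map (fun f => f.1)) from rfl,
          dropWhile_fst, hdw]
        simp
  · -- deeper: A attaches to prev, B pushes a frame
    have hAc := attach_common hinv hcr (by omega) (PySem.Str.strip s)
      ((((PySem.Str.split? s "    ").getD []).length : Int))
    refine ⟨_, _, _, ?_, ?_, hAc, ?_⟩
    · rw [stepA_push a (a.length - 1) (some r) s hnb hgt, attachAt_eq]
      rw [show (arenaAfter a (a.length - 1) (PySem.Str.strip s) ((((PySem.Str.split? s "    ").getD []).length : Int))).length - 1 = a.length by simp [arenaAfter_length]]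
    · exact stepB_push d1 l1 c1 fs0 out s hnb (by omega)
    · rw [List.map_cons, preStep_lt (by omega)]
      simp

theorem preStep_none (ds : List Int) : ds.foldl preStep none = none := by
  induction ds with
  | nil => rfl
  | cons d ds ih => simpa [preStep] using ih

theorem stepA_blank (a : List NodeA) (prev root : Option Nat) (s : String)
    (hb : PySem.Str.len (PySem.Str.strip s) = 0) :
    stepA (a, prev, root) s = (a, prev, root) := by
  simp only [stepA]
  rw [if_pos hb]

theorem stepB_blank (stack : List (Int × String × Int)) (out : List String) (s : String)
    (hb : PySem.Str.len (PySem.Str.strip s) = 0) :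
    stepB (stack, out) s = (stack, out) := by
  simp only [stepB]
  rw [if_pos hb]

theorem nbd_blank (s : String) (ls : List String)
    (hb : PySem.Str.len (PySem.Str.strip s) = 0) :
    nonBlankDepths (s :: ls) = nonBlankDepths ls := by
  simp only [nonBlankDepths, List.filter_cons]
  rw [if_neg (by simpa using hb)]

theorem nbd_cons (s : String) (ls : List String)
    (hb : ¬ PySem.Str.len (PySem.Str.strip s) = 0) :
    nonBlankDepths (s :: ls)
      = (((PySem.Str.split? s "    ").getD []).length : Int) :: nonBlankDepths ls := by
  simp only [nonBlankDepths, List.filter_cons]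
  rw [if_pos (by simpa using hb)]
  simp

theorem fold_inv (lines : List String) :
    ∀ (a : List NodeA) (r : Nat) (stack : List (Int × String × Int)) (out : List String),
    InvP a r stack out →
    (nonBlankDepths lines).foldl preStep (some (stack.map (fun f => f.1))) ≠ none →
    ∃ a' stack' out',
      lines.foldl stepA (a, some (a.length - 1), some r) = (a', some (a'.length - 1), some r) ∧
      lines.foldl stepB (stack, out) = (stack', out') ∧ InvP a' r stack' out' := by
  induction lines with
  | nil =>
    intro a r stack out hinv _
    exact ⟨a, stack, out, rfl, rfl, hinv⟩
  | cons s ls ih =>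
    intro a r stack out hinv hpre
    by_cases hb : PySem.Str.len (PySem.Str.strip s) = 0
    · have hA := stepA_blank a (some (a.length - 1)) (some r) s hb
      have hB := stepB_blank stack out s hb
      have hpre' : (nonBlankDepths ls).foldl preStep (some (stack.map (fun f => f.1))) ≠ none := by
        rwa [nbd_blank s ls hb] at hpre
      rw [List.foldl_cons, List.foldl_cons, hA, hB]
      exact ih a r stack out hinv hpre'
    · rw [nbd_cons s ls hb, List.foldl_cons] at hpre
      have hstep_ne : preStep (some (stack.map (fun f => f.1)))
          ((((PySem.Str.split? s "    ").getD []).length : Int)) ≠ none := by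
        intro hEq
        rw [hEq] at hpre
        exact hpre (preStep_none _)
      obtain ⟨a', stack', out', hA, hB, hinv', hps⟩ := step_one hinv s hb hstep_ne
      have hpre' : (nonBlankDepths ls).foldl preStep (some (stack'.map (fun f => f.1))) ≠ none := by
        rw [hps] at hpre
        exact hpre
      obtain ⟨a'', stack'', out'', hA2, hB2, hinv''⟩ := ih a' r stack' out' hinv' hpre'
      exact ⟨a'', stack'', out'', by rw [List.foldl_cons, hA]; exact hA2,
        by rw [List.foldl_cons, hB]; exact hB2, hinv''⟩

theorem fold_start (lines : List String)
    (hne : nonBlankDepths lines ≠ [])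
    (hpre : (nonBlankDepths lines).foldl preStep (some []) ≠ none) :
    ∃ a r stack out,
      lines.foldl stepA ([], none, none) = (a, some (a.length - 1), some r) ∧
      lines.foldl stepB ([], []) = (stack, out) ∧ InvP a r stack out := by
  induction lines with
  | nil => simp [nonBlankDepths] at hne
  | cons s ls ih =>
    by_cases hb : PySem.Str.len (PySem.Str.strip s) = 0
    · rw [nbd_blank s ls hb] at hne hpre
      obtain ⟨a, r, stack, out, hA, hB, hinv⟩ := ih hne hpre
      refine ⟨a, r, stack, out, ?_, ?_, hinv⟩
      · rw [List.foldl_cons, stepA_blank _ _ _ s hb]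
        exact hA
      · rw [List.foldl_cons, stepB_blank _ _ s hb]
        exact hB
    · rw [nbd_cons s ls hb] at hpre
      rw [List.foldl_cons, show preStep (some ([] : List Int))
          ((((PySem.Str.split? s "    ").getD []).length : Int))
          = some [(((PySem.Str.split? s "    ").getD []).length : Int)] from rfl] at hpre
      have hA1 : stepA ([], none, none) s
          = ([⟨PySem.Str.strip s, (((PySem.Str.split? s "    ").getD []).length : Int), [], none, 1⟩],
             some 0, some 0) := by
        simp only [stepA]
        rw [if_neg hb]
        rfl
      have hB1 : stepB ([], []) s
          = ([((((PySem.Str.split? s "    ").getD []).length : Int), "1.", 0)],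
             ["1." ++ " " ++ PySem.Str.strip s]) := by
        simp only [stepB]
        rw [if_neg hb]
        rfl
      have hs1 : ("" ++ PySem.Int.toStr (1 : Int) ++ "." : String) = "1." := by decide
      have hinv1 : InvP
          [⟨PySem.Str.strip s, (((PySem.Str.split? s "    ").getD []).length : Int), [], none, 1⟩] 0
          [((((PySem.Str.split? s "    ").getD []).length : Int), "1.", 0)]
          ["1." ++ " " ++ PySem.Str.strip s] := by
        refine ⟨by norm_num, rfl, ?_, ?_, ?_⟩
        · exact CRup.root 0 _ rfl rfl (by simp)
        · exact TWF.nil 0 1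
        · rw [visit_eq]
          simp
          decide
      obtain ⟨a', stack', out', hA2, hB2, hinv'⟩ := fold_inv ls _ 0 _ _ hinv1 (by simpa using hpre)
      refine ⟨a', 0, stack', out', ?_, ?_, hinv'⟩
      · rw [List.foldl_cons, hA1]
        exact hA2
      · rw [List.foldl_cons, hB1]
        exact hB2

-- ===== VERDICT (by name: the statement is the Claim_ definition above) =====
theorem parseTabbed_spec : Claim_equal_parseTabbed := by
  intro lines _ hpre
  unfold Spec_parseTabbed
  obtain ⟨hne, hfold⟩ := hpre
  obtain ⟨a, r, stack, out, hA, hB, hinv⟩ := fold_start lines hne hfold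
  unfold parseTabbed parseTabbed_alt
  rw [hA, hB]
  exact hinv.out_eq.symm

@[simp] theorem parseTabbed_raises : Claim_raises_parseTabbed := by
  unfold Claim_raises_parseTabbed
  exact ⟨fun lines _ h hp => hp.1 h, by decide⟩
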